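-- pv_equiv track=rewrite | github.com/YixiaJack/backing-track-generator | src/pad_gen.py | _filter_consonant
-- ===== SOURCE A (Python) =====
-- from typing import List, Tuple, Set
--
-- _CONSONANT_INTERVALS = {0, 3, 4, 5, 7, 8, 9, 12, 15, 16}  # unison, m3, M3, P4, P5, m6, M6, oct, ...
--
-- def _filter_consonant(
--     voicing: List[int], melody_pcs: Set[int], scale_pcs: Set[int]
-- ) -> List[int]:
--     """Remove pad notes that are dissonant against the melody.
--
--     A pad note is kept if:
--     1. Its pitch class is IN the melody (chord tone), OR
--     2. Its interval to at least one melody note is consonant (3rd, 5th, 6th, octave), OR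
--     3. Its pitch class is in the scale AND not a semitone away from any melody note
--
--     Based on consonance scoring from Automatic Melody Harmonization (Yeh et al., 2021).
--     """
--     if not melody_pcs:
--         return voicing
--
--     result: List[int] = []
--     for p in voicing:
--         pc = p % 12
--         # Rule 1: pad note is a melody tone → always consonant
--         if pc in melody_pcs:
--             result.append(p)
--             continue
--
--         # Rule 2: check intervals against each melody PC
--         consonant = False
--         for m_pc in melody_pcs:
--             interval = abs(pc - m_pc) % 12
--             if interval in _CONSONANT_INTERVALS:
--                 consonant = True
--                 break
--         if consonant:
--             result.append(p)
--             continue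
--
--         # Rule 3: in scale and not a semitone from melody → weak consonance, keep
--         if pc in scale_pcs:
--             semitone_clash = any(abs(pc - m_pc) % 12 in (1, 11) for m_pc in melody_pcs)
--             if not semitone_clash:
--                 result.append(p)
--
--     # Ensure we keep at least the root
--     if not result and voicing:
--         result = [voicing[0]]
--
--     return result
-- ===== SOURCE B (Python) =====
-- _CONSONANT_INTERVALS = {0, 3, 4, 5, 7, 8, 9, 12, 15, 16}
--
--
-- def _filter_consonant(voicing, melody_pcs, scale_pcs):
--     """Precompute the 12-entry consonant pitch-class table once, then filter in one pass."""
--     if not melody_pcs: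
--         return voicing
--
--     def keep(pc):
--         return (
--             pc in melody_pcs
--             or any(abs(pc - m) % 12 in _CONSONANT_INTERVALS for m in melody_pcs)
--             or (pc in scale_pcs
--                 and all(abs(pc - m) % 12 not in (1, 11) for m in melody_pcs))
--         )
--
--     consonant_pcs = {pc for pc in range(12) if keep(pc)}
--     result = [p for p in voicing if p % 12 in consonant_pcs]
--     if not result and voicing:
--         result = [voicing[0]]
--     return result
-- ===== Notes on version B (the rewrite author's own statement) =====
-- stated objective: simpler
-- what changed: Instead of re-running the three consonance rules inside nested loops for every pad note, B precomputes once a 12-entry set of consonant pitch classes and then filters the voicing in a single membership pass.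
import Mathlib
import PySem

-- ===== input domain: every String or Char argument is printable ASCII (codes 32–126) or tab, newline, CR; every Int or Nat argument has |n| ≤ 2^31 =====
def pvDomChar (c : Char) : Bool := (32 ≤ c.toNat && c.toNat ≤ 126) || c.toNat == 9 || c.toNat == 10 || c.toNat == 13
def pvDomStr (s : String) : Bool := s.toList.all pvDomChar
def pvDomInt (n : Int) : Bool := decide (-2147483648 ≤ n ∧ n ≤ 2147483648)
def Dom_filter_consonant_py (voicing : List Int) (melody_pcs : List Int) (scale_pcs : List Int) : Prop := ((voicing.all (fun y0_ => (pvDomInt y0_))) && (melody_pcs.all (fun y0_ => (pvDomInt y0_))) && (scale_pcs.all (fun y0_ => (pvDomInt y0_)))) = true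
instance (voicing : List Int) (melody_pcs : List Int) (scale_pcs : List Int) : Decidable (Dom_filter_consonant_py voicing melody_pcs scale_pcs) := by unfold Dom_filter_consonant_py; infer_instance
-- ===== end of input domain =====

-- B precomputes a 12-entry consonant pitch-class table once, then filters the voicing in one pass (simpler; same results).


-- ===== PORT A =====
def pvConsIntervals : List Int := [0, 3, 4, 5, 7, 8, 9, 12, 15, 16]

-- the 'for m_pc in melody_pcs: … break' loop of Rule 2
def pvRule2A (pc : Int) : List Int → Bool
  | [] => false
  | m :: rest =>
    if PySem.Int.mod (|pc - m|) 12 ∈ pvConsIntervals then true else pvRule2A pc rest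

def filter_consonant_py (voicing : List Int) (melody_pcs : List Int) (scale_pcs : List Int) : List Int :=
  if melody_pcs = [] then voicing
  else
    let result := voicing.foldl (fun result p =>
      let pc := PySem.Int.mod p 12
      if pc ∈ melody_pcs then result ++ [p]
      else if pvRule2A pc melody_pcs then result ++ [p]
      else if pc ∈ scale_pcs ∧
          (melody_pcs.any fun m =>
            PySem.Int.mod (|pc - m|) 12 == 1 || PySem.Int.mod (|pc - m|) 12 == 11) = false
        then result ++ [p] else result) []
    if result = [] ∧ voicing ≠ [] then [voicing.headI] else result

-- ===== PORT B =====
def pvKeepB (melody_pcs : List Int) (scale_pcs : List Int) (pc : Int) : Bool :=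
  decide (pc ∈ melody_pcs) ||
  (melody_pcs.any fun m => decide (PySem.Int.mod (|pc - m|) 12 ∈ pvConsIntervals)) ||
  (decide (pc ∈ scale_pcs) &&
    (melody_pcs.all fun m =>
      !(PySem.Int.mod (|pc - m|) 12 == 1 || PySem.Int.mod (|pc - m|) 12 == 11)))

def filter_consonant_py_alt (voicing : List Int) (melody_pcs : List Int) (scale_pcs : List Int) : List Int :=
  if melody_pcs = [] then voicing
  else
    let table := ((List.range 12).map Int.ofNat).filter (pvKeepB melody_pcs scale_pcs)
    let result := voicing.filter (fun p => decide (PySem.Int.mod p 12 ∈ table))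
    if result = [] ∧ voicing ≠ [] then [voicing.headI] else result

-- ===== PRECONDITION & SPEC =====
def Spec_filter_consonant_py (voicing : List Int) (melody_pcs : List Int) (scale_pcs : List Int) (out : List Int) : Prop := out = filter_consonant_py_alt voicing melody_pcs scale_pcs
instance (voicing : List Int) (melody_pcs : List Int) (scale_pcs : List Int) (out : List Int) : Decidable (Spec_filter_consonant_py voicing melody_pcs scale_pcs out) := by unfold Spec_filter_consonant_py; infer_instance

-- ===== CLAIM (what is proved, stated in full; the proofs are below) =====
def Claim_equal_filter_consonant_py : Prop := ∀ (voicing : List Int) (melody_pcs : List Int) (scale_pcs : List Int), Dom_filter_consonant_py voicing melody_pcs scale_pcs → Spec_filter_consonant_py voicing melody_pcs scale_pcs (filter_consonant_py voicing melody_pcs scale_pcs)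

-- ===== LEMMAS AND PROOFS =====

-- Rule 2's early-break loop is the 'any' of its test.
theorem pvRule2A_eq_any (pc : Int) (ms : List Int) :
    pvRule2A pc ms = ms.any (fun m => decide (PySem.Int.mod (|pc - m|) 12 ∈ pvConsIntervals)) := by
  induction ms with
  | nil => rfl
  | cons m rest ih =>
    by_cases h : PySem.Int.mod (|pc - m|) 12 ∈ pvConsIntervals
    · simp only [pvRule2A, List.any_cons, if_pos h, decide_eq_true h, Bool.true_or]
    · simp only [pvRule2A, List.any_cons, if_neg h, decide_eq_false h, Bool.false_or, ih]

-- p % 12 lies in the 0..11 table index range.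
theorem pvMod12_mem_range (p : Int) :
    PySem.Int.mod p 12 ∈ (List.range 12).map Int.ofNat := by
  have h0 : 0 ≤ PySem.Int.mod p 12 := PySem.Int.mod_nonneg p (by norm_num)
  have h1 : PySem.Int.mod p 12 < 12 := PySem.Int.mod_lt p (by norm_num)
  have h2 : ((PySem.Int.mod p 12).toNat : Int) = PySem.Int.mod p 12 := Int.toNat_of_nonneg h0
  simp only [List.mem_map, List.mem_range]
  exact ⟨(PySem.Int.mod p 12).toNat, by omega, h2⟩

-- Table membership of p % 12 decides exactly B's keep predicate.
theorem pvTable_decides (melody_pcs scale_pcs : List Int) (p : Int) :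
    decide (PySem.Int.mod p 12 ∈
        ((List.range 12).map Int.ofNat).filter (pvKeepB melody_pcs scale_pcs))
      = pvKeepB melody_pcs scale_pcs (PySem.Int.mod p 12) := by
  have hiff : (PySem.Int.mod p 12 ∈
      ((List.range 12).map Int.ofNat).filter (pvKeepB melody_pcs scale_pcs))
      ↔ pvKeepB melody_pcs scale_pcs (PySem.Int.mod p 12) = true := by
    rw [List.mem_filter]
    exact ⟨fun h => h.2, fun h => ⟨pvMod12_mem_range p, h⟩⟩
  cases hk : pvKeepB melody_pcs scale_pcs (PySem.Int.mod p 12) with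
  | true => exact decide_eq_true (hiff.mpr hk)
  | false =>
    exact decide_eq_false (fun hmem => by rw [hiff.mp hmem] at hk; exact Bool.noConfusion hk)

-- 'all not' is 'not any'.
theorem pvAll_not_eq_not_any (ms : List Int) (f : Int → Bool) :
    (ms.all fun m => !(f m)) = !(ms.any f) := by
  induction ms with
  | nil => rfl
  | cons a l ih => simp [List.all_cons, List.any_cons, ih, Bool.not_or]

-- A's loop body appends p exactly when p % 12 is in B's table.
theorem pvBody_eq (melody_pcs scale_pcs : List Int) (res : List Int) (p : Int) :
    (if PySem.Int.mod p 12 ∈ melody_pcs then res ++ [p]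
      else if pvRule2A (PySem.Int.mod p 12) melody_pcs then res ++ [p]
      else if PySem.Int.mod p 12 ∈ scale_pcs ∧
          (melody_pcs.any fun m =>
            PySem.Int.mod (|PySem.Int.mod p 12 - m|) 12 == 1 ||
            PySem.Int.mod (|PySem.Int.mod p 12 - m|) 12 == 11) = false
        then res ++ [p] else res)
    = (if decide (PySem.Int.mod p 12 ∈
          ((List.range 12).map Int.ofNat).filter (pvKeepB melody_pcs scale_pcs)) = true
        then res ++ [p] else res) := by
  rw [pvTable_decides]
  simp only [pvKeepB, pvRule2A_eq_any, pvAll_not_eq_not_any]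
  by_cases h1 : PySem.Int.mod p 12 ∈ melody_pcs
  · simp only [if_pos h1, decide_eq_true h1, Bool.true_or]
    simp
  · simp only [if_neg h1, decide_eq_false h1, Bool.false_or]
    cases h2 : melody_pcs.any fun m =>
        decide (PySem.Int.mod (|PySem.Int.mod p 12 - m|) 12 ∈ pvConsIntervals) with
    | true => simp
    | false =>
      simp only [Bool.false_or, if_neg (by simp : ¬ (false = true))]
      by_cases h3 : PySem.Int.mod p 12 ∈ scale_pcs
      · cases h4 : melody_pcs.any fun m =>
            PySem.Int.mod (|PySem.Int.mod p 12 - m|) 12 == 1 ||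
            PySem.Int.mod (|PySem.Int.mod p 12 - m|) 12 == 11 with
        | true => simp
        | false => simp
      · simp

theorem pvMain (voicing melody_pcs scale_pcs : List Int) :
    filter_consonant_py voicing melody_pcs scale_pcs
      = filter_consonant_py_alt voicing melody_pcs scale_pcs := by
  unfold filter_consonant_py filter_consonant_py_alt
  by_cases hm : melody_pcs = []
  · simp [hm]
  · simp only [hm, if_false]
    have hstep : voicing.foldl (fun result p =>
        let pc := PySem.Int.mod p 12
        if pc ∈ melody_pcs then result ++ [p]
        else if pvRule2A pc melody_pcs then result ++ [p]
        else if pc ∈ scale_pcs ∧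
            (melody_pcs.any fun m =>
              PySem.Int.mod (|pc - m|) 12 == 1 || PySem.Int.mod (|pc - m|) 12 == 11) = false
          then result ++ [p] else result) []
        = voicing.foldl (fun acc x =>
            if (fun q => decide (PySem.Int.mod q 12 ∈
              ((List.range 12).map Int.ofNat).filter (pvKeepB melody_pcs scale_pcs))) x = true
            then acc ++ [x] else acc) [] :=
      congrArg (fun f => voicing.foldl f [])
        (funext fun res => funext fun p => pvBody_eq melody_pcs scale_pcs res p)
    have hfil := PySem.List.foldl_append_if_eq_filter
      (l := voicing)
      (p := fun q => decide (PySem.Int.mod q 12 ∈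
        ((List.range 12).map Int.ofNat).filter (pvKeepB melody_pcs scale_pcs)))
      (acc := ([] : List Int))
    rw [List.nil_append] at hfil
    have hres := hstep.trans hfil
    rw [hres]

-- ===== VERDICT (by name: the statement is the Claim_ definition above) =====
theorem filter_consonant_py_spec : Claim_equal_filter_consonant_py := by
  intro voicing melody_pcs scale_pcs _
  exact pvMain voicing melody_pcs scale_pcs
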